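-- pv_equiv track=rewrite | github.com/uvsq22301314/l1-python | exercises/TD04_listes/fi.py | carre_normal
-- ===== SOURCE A (Python) =====
-- def carre_normal(carre):
--     liste_entiers = [i for i in range(1, len(carre)**2+1)]
--     for x in range(len(carre)):
--         for y in range(len(carre[x])):
--             if carre[x][y] in liste_entiers:
--                 del liste_entiers[liste_entiers.index(carre[x][y])]
--             else:
--                 return "Non normal"
--     return "Carré normal"
-- ===== SOURCE B (Python) =====
-- def carre_normal(carre):
--     n = len(carre)
--     values = [v for row in carre for v in row]
--     if len(set(values)) == len(values) and all(1 <= v <= n * n for v in values):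
--         return "Carré normal"
--     return "Non normal"
-- ===== Notes on version B (the rewrite author's own statement) =====
-- stated objective: alternative
-- what changed: Replaces A's shrinking-pool early-return loop (list 'in'/index/del scans over a pool of n^2 candidates per cell) with one flattening pass plus an aggregate distinctness check via a set and a per-value range bound.
import Mathlib
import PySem

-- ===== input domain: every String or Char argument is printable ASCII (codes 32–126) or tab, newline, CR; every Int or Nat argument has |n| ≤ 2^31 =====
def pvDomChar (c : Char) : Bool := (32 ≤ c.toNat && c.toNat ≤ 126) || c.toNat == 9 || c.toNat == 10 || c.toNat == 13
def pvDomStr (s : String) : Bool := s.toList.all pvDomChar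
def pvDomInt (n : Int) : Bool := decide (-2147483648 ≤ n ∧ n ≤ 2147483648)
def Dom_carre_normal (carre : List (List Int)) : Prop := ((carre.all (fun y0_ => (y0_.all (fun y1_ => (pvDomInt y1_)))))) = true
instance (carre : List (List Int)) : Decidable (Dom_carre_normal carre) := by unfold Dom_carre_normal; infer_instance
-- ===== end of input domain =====

-- B replaces A's shrinking-pool early-return scan (list 'in'/index/del over up to n² candidates
-- per cell) with one flattening pass plus an aggregate distinctness (set) and range check.


-- ===== PORT A =====
-- inner loop 'for y in range(len(carre[x]))': walks the row's cells in order;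
-- 'del liste[liste.index(v)]' removes the first occurrence = List.erase; 'return "Non normal"' = none
def cnRow (pool : List Int) (row : List Int) : Option (List Int) :=
  match row with
  | [] => some pool
  | v :: r => if v ∈ pool then cnRow (pool.erase v) r else none

-- outer loop 'for x in range(len(carre))', threading the mutable pool
def cnRows (pool : List Int) (rows : List (List Int)) : Option (List Int) :=
  match rows with
  | [] => some pool
  | row :: rest =>
    match cnRow pool row with
    | none => none
    | some p => cnRows p rest

def carre_normal (carre : List (List Int)) : String :=
  let liste_entiers := PySem.List.pyRange 1 ((carre.length : Int) ^ 2 + 1) 1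
  match cnRows liste_entiers carre with
  | none => "Non normal"
  | some _ => "Carré normal"

-- ===== PORT B =====
def carre_normal_alt (carre : List (List Int)) : String :=
  let n : Int := carre.length
  let values := carre.flatMap (fun row => row)
  if (PySem.Set.ofList values).length = values.length ∧ values.all (fun v => decide (1 ≤ v) && decide (v ≤ n * n))
  then "Carré normal" else "Non normal"

-- ===== PRECONDITION & SPEC =====
def Spec_carre_normal (carre : List (List Int)) (out : String) : Prop := out = carre_normal_alt carre
instance (carre : List (List Int)) (out : String) : Decidable (Spec_carre_normal carre out) := by unfold Spec_carre_normal; infer_instance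

-- ===== CLAIM (what is proved, stated in full; the proofs are below) =====
def Claim_equal_carre_normal : Prop := ∀ (carre : List (List Int)), Dom_carre_normal carre → Spec_carre_normal carre (carre_normal carre)

-- ===== LEMMAS AND PROOFS =====

-- A's row loop succeeds on a duplicate-free pool iff the row is duplicate-free and inside the pool
theorem cnRow_isSome_iff (pool row : List Int) (h : pool.Nodup) :
    (cnRow pool row).isSome ↔ row.Nodup ∧ ∀ v ∈ row, v ∈ pool := by
  induction row generalizing pool with
  | nil => simp [cnRow]
  | cons v r ih =>
    simp only [cnRow]
    by_cases hv : v ∈ pool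
    · rw [if_pos hv, ih _ (h.erase v)]
      simp only [List.nodup_cons, List.mem_cons]
      constructor
      · rintro ⟨hnd, hsub⟩
        have hvr : v ∉ r := fun hm => by
          have := (h.mem_erase_iff).mp (hsub v hm); exact this.1 rfl
        exact ⟨⟨hvr, hnd⟩, by
          rintro w (rfl | hw)
          · exact hv
          · exact ((h.mem_erase_iff).mp (hsub w hw)).2⟩
      · rintro ⟨⟨hvr, hnd⟩, hsub⟩
        refine ⟨hnd, fun w hw => (h.mem_erase_iff).mpr ⟨?_, hsub w (Or.inr hw)⟩⟩
        rintro rfl; exact hvr hw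
    · rw [if_neg hv]
      simp only [Option.isSome_none, Bool.false_eq_true, false_iff]
      rintro ⟨_, hsub⟩; exact hv (hsub v (List.mem_cons_self))

-- row loop on a concatenation = sequencing
theorem cnRow_append (pool a b : List Int) :
    cnRow pool (a ++ b) = (cnRow pool a).bind (fun p => cnRow p b) := by
  induction a generalizing pool with
  | nil => simp [cnRow]
  | cons v r ih =>
    simp only [List.cons_append, cnRow]
    by_cases hv : v ∈ pool
    · simp only [if_pos hv]; exact ih _
    · simp only [if_neg hv]; rfl

-- the nested loops of A = the row loop over the flattened grid
theorem cnRows_eq_flat (pool : List Int) (rows : List (List Int)) :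
    cnRows pool rows = cnRow pool (rows.flatMap (fun row => row)) := by
  induction rows generalizing pool with
  | nil => simp [cnRows, cnRow]
  | cons row rest ih =>
    simp only [cnRows, List.flatMap_cons, cnRow_append]
    cases cnRow pool row with
    | none => rfl
    | some p => exact ih p

-- PySem.Set.ofList builds the sublist of first occurrences
theorem ofList_sublist (xs : List Int) : (PySem.Set.ofList xs).Sublist xs := by
  suffices h : ∀ (s : List Int), ∃ t, xs.foldl PySem.Set.add s = s ++ t ∧ t.Sublist xs by
    obtain ⟨t, ht, hs⟩ := h []
    rw [PySem.Set.ofList_eq_foldl, ht]; simpa using hs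
  induction xs with
  | nil => exact fun s => ⟨[], by simp, List.Sublist.refl []⟩
  | cons x xs ih =>
    intro s
    obtain ⟨t, ht, hs⟩ := ih (PySem.Set.add s x)
    simp only [List.foldl_cons]
    by_cases hx : x ∈ s
    · exact ⟨t, by rw [ht]; simp [PySem.Set.add, hx], hs.cons x⟩
    · exact ⟨x :: t, by rw [ht]; simp [PySem.Set.add, hx], hs.cons₂ x⟩

-- len(set(xs)) == len(xs) is exactly distinctness
theorem ofList_length_iff (xs : List Int) :
    (PySem.Set.ofList xs).length = xs.length ↔ xs.Nodup := by
  constructor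
  · intro h
    have := (ofList_sublist xs).eq_of_length h
    rw [← this]; exact PySem.Set.nodup_ofList xs
  · intro h
    have hsub : xs ⊆ PySem.Set.ofList xs := fun v hv => (PySem.Set.mem_ofList xs v).mpr hv
    have hle : xs.length ≤ (PySem.Set.ofList xs).length := (h.subperm hsub).length_le
    exact le_antisymm (ofList_sublist xs).length_le hle

-- ===== VERDICT (by name: the statement is the Claim_ definition above) =====
theorem carre_normal_spec : Claim_equal_carre_normal := by
  intro carre _
  show carre_normal carre = carre_normal_alt carre
  unfold carre_normal carre_normal_alt
  simp only [cnRows_eq_flat]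
  set n : Int := (carre.length : Int) with hn
  set values := carre.flatMap (fun row => row) with hv
  have hpool : (PySem.List.pyRange 1 (n ^ 2 + 1) 1).Nodup := PySem.List.nodup_pyRange_one 1 _
  have hiff := cnRow_isSome_iff (PySem.List.pyRange 1 (n ^ 2 + 1) 1) values hpool
  by_cases hok : values.Nodup ∧ ∀ v ∈ values, 1 ≤ v ∧ v ≤ n * n
  · have hsome : (cnRow (PySem.List.pyRange 1 (n ^ 2 + 1) 1) values).isSome := by
      rw [hiff]
      refine ⟨hok.1, fun v hvv => ?_⟩
      rw [PySem.List.mem_pyRange_one]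
      have := hok.2 v hvv
      constructor
      · exact this.1
      · have : v ≤ n * n := this.2
        nlinarith [this]
    cases hcn : cnRow (PySem.List.pyRange 1 (n ^ 2 + 1) 1) values with
    | none => rw [hcn] at hsome; simp at hsome
    | some p =>
      rw [if_pos]
      constructor
      · exact (ofList_length_iff values).mpr hok.1
      · rw [List.all_eq_true]
        intro v hvv
        have := hok.2 v hvv
        simp [this.1, this.2]
  · have hnone : cnRow (PySem.List.pyRange 1 (n ^ 2 + 1) 1) values = none := by
      cases hcn : cnRow (PySem.List.pyRange 1 (n ^ 2 + 1) 1) values with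
      | none => rfl
      | some p =>
        exfalso
        have : (cnRow (PySem.List.pyRange 1 (n ^ 2 + 1) 1) values).isSome := by rw [hcn]; rfl
        rw [hiff] at this
        refine hok ⟨this.1, fun v hvv => ?_⟩
        have := this.2 v hvv
        rw [PySem.List.mem_pyRange_one] at this
        refine ⟨this.1, ?_⟩
        have : v < n ^ 2 + 1 := this.2
        nlinarith
    rw [hnone, if_neg]
    intro hcontr
    refine hok ⟨(ofList_length_iff values).mp hcontr.1, fun v hvv => ?_⟩
    have := (List.all_eq_true.mp hcontr.2) v hvv
    simp only [Bool.and_eq_true, decide_eq_true_eq] at this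
    exact this
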